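-- pv_equiv track=rewrite | github.com/Zaf-Mif/CSEC-CPD-Contests | CSEC ASTU Division I (Core) Contest Round 8/A_Divide_it.py | solve
-- ===== SOURCE A (Python) =====
-- def solve(n):
--     if n == 1:
--         return 0
--     if n % 2 != 0 and n % 3 != 0 and n % 5 != 0:
--         return -1
--     cnt = 0
--     while (n % 2 == 0 or n % 3 == 0 or n % 5 == 0) or n == 1:
--         if n % 5 == 0:
--             n = (4*n) // 5
--             cnt += 1
--         elif n % 3 == 0:
--             n = (2 * n) // 3
--             cnt += 1
--         elif n % 2 == 0:
--             n //= 2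
--             cnt += 1
--         if n == 1:
--             return cnt
--     return -1
-- ===== SOURCE B (Python) =====
-- def _strip(n, d):
--     """Divide d out of n as often as possible; return (exponent, remainder)."""
--     k = 0
--     while n % d == 0:
--         n //= d
--         k += 1
--     return k, n
--
--
-- def solve(n):
--     a, n = _strip(n, 2)
--     b, n = _strip(n, 3)
--     c, n = _strip(n, 5)
--     return a + 2 * b + 3 * c if n == 1 else -1
-- ===== Notes on version B (the rewrite author's own statement) =====
-- stated objective: simpler
-- what changed: B factors out the exponents a,b,c of 2,3,5 with three divide-out loops and returns the closed-form weighted count a+2b+3c (or -1 if a remainder is left), instead of A's step-by-step simulation that multiplies by 4/5 or 2/3 while counting operations.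
import Mathlib
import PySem

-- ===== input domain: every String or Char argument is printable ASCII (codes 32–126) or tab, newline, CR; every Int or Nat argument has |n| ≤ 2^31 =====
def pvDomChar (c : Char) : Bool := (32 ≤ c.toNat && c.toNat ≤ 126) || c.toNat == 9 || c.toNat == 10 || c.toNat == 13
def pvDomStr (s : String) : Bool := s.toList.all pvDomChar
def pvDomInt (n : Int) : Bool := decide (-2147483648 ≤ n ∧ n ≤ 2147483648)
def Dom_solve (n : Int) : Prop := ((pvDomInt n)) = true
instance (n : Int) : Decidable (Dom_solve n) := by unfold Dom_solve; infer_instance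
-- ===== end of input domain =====

-- B replaces A's fraction-multiplication simulation by factoring out the exponents of
-- 2, 3, 5 and returning the weighted count a+2b+3c; equivalence is proved for n ≠ 0
-- (both Pythons loop forever on n = 0).

-- termination helpers for the ports (cited by name in decreasing_by)
theorem pv_div5_lt (n : Int) (hn : n ≠ 0) (h : (5:Int) ∣ n) :
    ((4 * n) / 5).natAbs < n.natAbs := by
  obtain ⟨k, rfl⟩ := h
  rw [show (4 * (5 * k)) = 5 * (4 * k) by ring, Int.mul_ediv_cancel_left _ (by norm_num)]
  have hk : k ≠ 0 := by rintro rfl; simp at hn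
  simp only [Int.natAbs_mul]
  have : 1 ≤ k.natAbs := by omega
  calc (4:Int).natAbs * k.natAbs = 4 * k.natAbs := rfl
    _ < 5 * k.natAbs := by omega
    _ = (5:Int).natAbs * k.natAbs := rfl

theorem pv_div3_lt (n : Int) (hn : n ≠ 0) (h : (3:Int) ∣ n) :
    ((2 * n) / 3).natAbs < n.natAbs := by
  obtain ⟨k, rfl⟩ := h
  rw [show (2 * (3 * k)) = 3 * (2 * k) by ring, Int.mul_ediv_cancel_left _ (by norm_num)]
  have hk : k ≠ 0 := by rintro rfl; simp at hn
  simp only [Int.natAbs_mul]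
  have : 1 ≤ k.natAbs := by omega
  calc (2:Int).natAbs * k.natAbs = 2 * k.natAbs := rfl
    _ < 3 * k.natAbs := by omega
    _ = (3:Int).natAbs * k.natAbs := rfl

theorem pv_divd_lt (d n : Int) (hd : 2 ≤ d) (hn : n ≠ 0) (h : d ∣ n) :
    (n / d).natAbs < n.natAbs := by
  obtain ⟨k, rfl⟩ := h
  rw [Int.mul_ediv_cancel_left _ (by omega)]
  have hk : k ≠ 0 := by rintro rfl; simp at hn
  simp only [Int.natAbs_mul]
  have h1 : 1 ≤ k.natAbs := by omega
  have h2 : 2 ≤ d.natAbs := by omega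
  calc k.natAbs = 1 * k.natAbs := by omega
    _ < d.natAbs * k.natAbs := by
        exact Nat.mul_lt_mul_of_lt_of_le (by omega) (le_refl _) (by omega)

-- ===== PORT A =====
-- the while-loop of A; the 'n = 0' test is a totality guard only: Python diverges
-- there and Pre_solve excludes it
def solveLoop (n cnt : Int) : Int :=
  if hc : (PySem.Int.mod n 2 = 0 ∨ PySem.Int.mod n 3 = 0 ∨ PySem.Int.mod n 5 = 0) ∨ n = 1 then
    if hz : n = 0 then -1
    else if h5 : PySem.Int.mod n 5 = 0 then
      (if PySem.Int.floordiv (4 * n) 5 = 1 then cnt + 1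
       else solveLoop (PySem.Int.floordiv (4 * n) 5) (cnt + 1))
    else if h3 : PySem.Int.mod n 3 = 0 then
      (if PySem.Int.floordiv (2 * n) 3 = 1 then cnt + 1
       else solveLoop (PySem.Int.floordiv (2 * n) 3) (cnt + 1))
    else if h2 : PySem.Int.mod n 2 = 0 then
      (if PySem.Int.floordiv n 2 = 1 then cnt + 1
       else solveLoop (PySem.Int.floordiv n 2) (cnt + 1))
    else (if hone : n = 1 then cnt else solveLoop n cnt)
  else -1
termination_by n.natAbs
decreasing_by
  · rw [PySem.Int.floordiv_eq_ediv_of_pos (by norm_num)]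
    exact pv_div5_lt n hz ((PySem.Int.mod_eq_zero_iff_dvd n 5).mp h5)
  · rw [PySem.Int.floordiv_eq_ediv_of_pos (by norm_num)]
    exact pv_div3_lt n hz ((PySem.Int.mod_eq_zero_iff_dvd n 3).mp h3)
  · rw [PySem.Int.floordiv_eq_ediv_of_pos (by norm_num)]
    exact pv_divd_lt 2 n (by norm_num) hz ((PySem.Int.mod_eq_zero_iff_dvd n 2).mp h2)
  · exact absurd (by tauto : n = 1) hone

def solve (n : Int) : Int :=
  if n = 1 then 0
  else if PySem.Int.mod n 2 ≠ 0 ∧ PySem.Int.mod n 3 ≠ 0 ∧ PySem.Int.mod n 5 ≠ 0 then -1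
  else solveLoop n 0

-- ===== PORT B =====
-- _strip's while-loop; '2 ≤ d ∧ n ≠ 0' is a totality guard only: it is called with
-- d = 2, 3, 5, and Python diverges at n = 0, which Pre_solve excludes
def stripLoop (d n k : Int) : Int × Int :=
  if hg : 2 ≤ d ∧ n ≠ 0 ∧ PySem.Int.mod n d = 0 then
    stripLoop d (PySem.Int.floordiv n d) (k + 1)
  else (k, n)
termination_by n.natAbs
decreasing_by
  rw [PySem.Int.floordiv_eq_ediv_of_pos (by omega)]
  exact pv_divd_lt d n hg.1 hg.2.1 ((PySem.Int.mod_eq_zero_iff_dvd n d).mp hg.2.2)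

def solve_alt (n : Int) : Int :=
  let p2 := stripLoop 2 n 0
  let p3 := stripLoop 3 p2.2 0
  let p5 := stripLoop 5 p3.2 0
  if p5.2 = 1 then p2.1 + 2 * p3.1 + 3 * p5.1 else -1

-- ===== PRECONDITION & SPEC =====
-- Pre_ excludes only n = 0, on which A (and B) loop forever and return nothing
def Pre_solve (n : Int) : Prop := n ≠ 0
instance (n : Int) : Decidable (Pre_solve n) := by unfold Pre_solve; infer_instance
def pvWitness_solve : Int := 12

def Spec_solve (n : Int) (out : Int) : Prop := out = solve_alt n
instance (n : Int) (out : Int) : Decidable (Spec_solve n out) := by unfold Spec_solve; infer_instance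

-- ===== CLAIM (what is proved, stated in full; the proofs are below) =====
def Claim_equal_solve : Prop := ∀ (n : Int), Dom_solve n → Pre_solve n → Spec_solve n (solve n)

-- ===== LEMMAS AND PROOFS =====

theorem prime2 : Prime (2 : Int) := Int.prime_two
theorem prime3 : Prime (3 : Int) := Int.prime_three
theorem prime5 : Prime (5 : Int) := by
  rw [Int.prime_iff_natAbs_prime]; norm_num

-- p prime, p ∤ q : p does not divide q^k
theorem not_dvd_pow (p q : Int) (hp : Prime p) (h : ¬ p ∣ q) (k : Nat) : ¬ p ∣ q ^ k :=
  fun hd => h (hp.dvd_of_dvd_pow hd)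

theorem dvd_decomp_iff (p : Int) (hp : Prime p) (a b c : Nat) (r : Int)
    (h2 : ¬ p ∣ 2 ∨ a = 0) (h3 : ¬ p ∣ 3 ∨ b = 0) (h5 : ¬ p ∣ 5 ∨ c = 0) (hr : ¬ p ∣ r) :
    ¬ p ∣ 2 ^ a * 3 ^ b * 5 ^ c * r := by
  intro hd
  rcases (hp.dvd_mul.mp hd) with hd | hd
  · rcases (hp.dvd_mul.mp hd) with hd | hd
    · rcases (hp.dvd_mul.mp hd) with hd | hd
      · rcases h2 with h | rfl
        · exact not_dvd_pow p 2 hp h a hd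
        · simp at hd; exact hp.not_dvd_one hd
      · rcases h3 with h | rfl
        · exact not_dvd_pow p 3 hp h b hd
        · simp at hd; exact hp.not_dvd_one hd
    · rcases h5 with h | rfl
      · exact not_dvd_pow p 5 hp h c hd
      · simp at hd; exact hp.not_dvd_one hd
  · exact hr hd

theorem decomp_ne_zero (a b c : Nat) (r : Int) (hr : r ≠ 0) :
    2 ^ a * 3 ^ b * 5 ^ c * r ≠ 0 := by
  refine mul_ne_zero (mul_ne_zero (mul_ne_zero ?_ ?_) ?_) hr <;> positivity

theorem ne_zero_of_not_two_dvd (r : Int) (h : ¬ (2:Int) ∣ r) : r ≠ 0 := by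
  rintro rfl; exact h (dvd_zero 2)

-- stripLoop evaluated on an explicit decomposition
theorem stripLoop_eq (d : Int) (hd : 2 ≤ d) (k : Nat) :
    ∀ (m k0 : Int), ¬ d ∣ m → stripLoop d (d ^ k * m) k0 = (k0 + (k : Int), m) := by
  induction k with
  | zero =>
      intro m k0 hm
      have hmod : ¬ PySem.Int.mod m d = 0 := by
        rw [PySem.Int.mod_eq_zero_iff_dvd]; exact hm
      rw [pow_zero, one_mul, stripLoop, dif_neg (by tauto)]
      simp
  | succ k ih =>
      intro m k0 hm
      have hm0 : m ≠ 0 := by rintro rfl; exact hm (dvd_zero d)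
      have hn0 : d ^ (k + 1) * m ≠ 0 :=
        mul_ne_zero (pow_ne_zero _ (by omega)) hm0
      have hdvd : d ∣ d ^ (k + 1) * m := by
        exact Dvd.dvd.mul_right (dvd_pow_self d (Nat.succ_ne_zero k)) m
      have hmod : PySem.Int.mod (d ^ (k + 1) * m) d = 0 :=
        (PySem.Int.mod_eq_zero_iff_dvd _ d).mpr hdvd
      have hdiv : PySem.Int.floordiv (d ^ (k + 1) * m) d = d ^ k * m := by
        rw [PySem.Int.floordiv_eq_ediv_of_pos (by omega),
            show d ^ (k + 1) * m = d * (d ^ k * m) by ring,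
            Int.mul_ediv_cancel_left _ (by omega)]
      rw [stripLoop, dif_pos ⟨hd, hn0, hmod⟩, hdiv, ih m (k0 + 1) hm]
      congr 1
      push_cast
      ring

-- every nonzero integer has the form d^k * m with d ∤ m
theorem factor_out (d : Int) (hd : 2 ≤ d) :
    ∀ (N : Nat) (n : Int), n.natAbs ≤ N → n ≠ 0 →
      ∃ (k : Nat) (m : Int), n = d ^ k * m ∧ ¬ d ∣ m := by
  intro N
  induction N with
  | zero => intro n hN hn; omega
  | succ N ih =>
      intro n hN hn
      by_cases hdvd : d ∣ n
      · obtain ⟨c, rfl⟩ := hdvd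
        have hc : c ≠ 0 := by rintro rfl; simp at hn
        have hlt : c.natAbs ≤ N := by
          have := pv_divd_lt d (d * c) hd hn ⟨c, rfl⟩
          rw [Int.mul_ediv_cancel_left _ (by omega)] at this
          omega
        obtain ⟨k, m, hm, hdm⟩ := ih c hlt hc
        exact ⟨k + 1, m, by rw [hm]; ring, hdm⟩
      · exact ⟨0, n, by ring, hdvd⟩

theorem decomp_exists (n : Int) (hn : n ≠ 0) :
    ∃ (a b c : Nat) (r : Int),
      n = 2 ^ a * 3 ^ b * 5 ^ c * r ∧ ¬ (2:Int) ∣ r ∧ ¬ (3:Int) ∣ r ∧ ¬ (5:Int) ∣ r := by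
  obtain ⟨a, m, hm, h2m⟩ := factor_out 2 (by norm_num) n.natAbs n (le_refl _) hn
  have hm0 : m ≠ 0 := by rintro rfl; exact h2m (dvd_zero 2)
  obtain ⟨b, m2, hm2, h3m2⟩ := factor_out 3 (by norm_num) m.natAbs m (le_refl _) hm0
  have hm20 : m2 ≠ 0 := by rintro rfl; exact h3m2 (dvd_zero 3)
  obtain ⟨c, r, hr, h5r⟩ := factor_out 5 (by norm_num) m2.natAbs m2 (le_refl _) hm20
  refine ⟨a, b, c, r, by rw [hm, hm2, hr]; ring, ?_, ?_, h5r⟩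
  · intro h; exact h2m (by rw [hm2, hr]; exact Dvd.dvd.mul_left (Dvd.dvd.mul_left h _) _)
  · intro h; exact h3m2 (by rw [hr]; exact Dvd.dvd.mul_left h _)

-- closed form of solve_alt on a decomposition
theorem alt_char (a b c : Nat) (r : Int)
    (h2 : ¬ (2:Int) ∣ r) (h3 : ¬ (3:Int) ∣ r) (h5 : ¬ (5:Int) ∣ r) :
    solve_alt (2 ^ a * 3 ^ b * 5 ^ c * r)
      = if r = 1 then ((a : Int) + 2 * b + 3 * c) else -1 := by
  have e2 : stripLoop 2 (2 ^ a * (3 ^ b * 5 ^ c * r)) 0 = (0 + (a : Int), 3 ^ b * 5 ^ c * r) :=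
    stripLoop_eq 2 (by norm_num) a (3 ^ b * 5 ^ c * r) 0
      (dvd_decomp_iff 2 prime2 0 b c r (Or.inr rfl) (Or.inl (by decide)) (Or.inl (by decide))
        h2 ∘ (by intro h; simpa using h))
  have e3 : stripLoop 3 (3 ^ b * (5 ^ c * r)) 0 = (0 + (b : Int), 5 ^ c * r) :=
    stripLoop_eq 3 (by norm_num) b (5 ^ c * r) 0
      (dvd_decomp_iff 3 prime3 0 0 c r (Or.inl (by decide)) (Or.inr rfl) (Or.inl (by decide))
        h3 ∘ (by intro h; simpa using h))
  have e5 : stripLoop 5 (5 ^ c * r) 0 = (0 + (c : Int), r) :=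
    stripLoop_eq 5 (by norm_num) c r 0 h5
  unfold solve_alt
  rw [show 2 ^ a * 3 ^ b * 5 ^ c * r = 2 ^ a * (3 ^ b * 5 ^ c * r) by ring, e2]
  simp only
  rw [show 3 ^ b * 5 ^ c * r = 3 ^ b * (5 ^ c * r) by ring, e3]
  simp only
  rw [e5]
  simp only [zero_add]

-- divisibility tests on a decomposition
theorem five_dvd_iff (a b c : Nat) (r : Int) (h5 : ¬ (5:Int) ∣ r) :
    (5:Int) ∣ 2 ^ a * 3 ^ b * 5 ^ c * r ↔ 0 < c := by
  constructor
  · intro h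
    rcases Nat.eq_zero_or_pos c with rfl | hc
    · exact absurd h (dvd_decomp_iff 5 prime5 a b 0 r (Or.inl (by decide)) (Or.inl (by decide))
        (Or.inr rfl) h5)
    · exact hc
  · intro hc
    exact Dvd.dvd.mul_right (Dvd.dvd.mul_left (dvd_pow_self 5 (by omega)) _) r

theorem three_dvd_iff (a b c : Nat) (r : Int) (h3 : ¬ (3:Int) ∣ r) :
    (3:Int) ∣ 2 ^ a * 3 ^ b * 5 ^ c * r ↔ 0 < b := by
  constructor
  · intro h
    rcases Nat.eq_zero_or_pos b with rfl | hb
    · exact absurd h (dvd_decomp_iff 3 prime3 a 0 c r (Or.inl (by decide)) (Or.inr rfl)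
        (Or.inl (by decide)) h3)
    · exact hb
  · intro hb
    exact Dvd.dvd.mul_right (Dvd.dvd.mul_right (Dvd.dvd.mul_left (dvd_pow_self 3 (by omega)) _) _) r

theorem two_dvd_iff (a b c : Nat) (r : Int) (h2 : ¬ (2:Int) ∣ r) :
    (2:Int) ∣ 2 ^ a * 3 ^ b * 5 ^ c * r ↔ 0 < a := by
  constructor
  · intro h
    rcases Nat.eq_zero_or_pos a with rfl | ha
    · exact absurd h (dvd_decomp_iff 2 prime2 0 b c r (Or.inr rfl) (Or.inl (by decide))
        (Or.inl (by decide)) h2)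
    · exact ha
  · intro ha
    exact Dvd.dvd.mul_right
      (Dvd.dvd.mul_right (Dvd.dvd.mul_right (dvd_pow_self 2 (by omega)) _) _) r

-- the core invariant: A's loop on a decomposed input
theorem loop_eq : ∀ (W a b c : Nat) (r cnt : Int), a + 2 * b + 3 * c ≤ W →
    ¬ (2:Int) ∣ r → ¬ (3:Int) ∣ r → ¬ (5:Int) ∣ r → 1 ≤ a + b + c →
    solveLoop (2 ^ a * 3 ^ b * 5 ^ c * r) cnt
      = if r = 1 then cnt + ((a : Int) + 2 * b + 3 * c) else -1 := by
  intro W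
  induction W with
  | zero => intro a b c r cnt hW _ _ _ hsum; omega
  | succ W ih =>
    intro a b c r cnt hW h2 h3 h5 hsum
    have hr0 : r ≠ 0 := ne_zero_of_not_two_dvd r h2
    have hn0 : 2 ^ a * 3 ^ b * 5 ^ c * r ≠ 0 := decomp_ne_zero a b c r hr0
    have d5 : PySem.Int.mod (2 ^ a * 3 ^ b * 5 ^ c * r) 5 = 0 ↔ 0 < c := by
      rw [PySem.Int.mod_eq_zero_iff_dvd]; exact five_dvd_iff a b c r h5
    have d3 : PySem.Int.mod (2 ^ a * 3 ^ b * 5 ^ c * r) 3 = 0 ↔ 0 < b := by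
      rw [PySem.Int.mod_eq_zero_iff_dvd]; exact three_dvd_iff a b c r h3
    have d2 : PySem.Int.mod (2 ^ a * 3 ^ b * 5 ^ c * r) 2 = 0 ↔ 0 < a := by
      rw [PySem.Int.mod_eq_zero_iff_dvd]; exact two_dvd_iff a b c r h2
    rcases c with _ | c'
    · rcases b with _ | b'
      · -- only twos: a ≥ 1
        rcases a with _ | a'
        · omega
        have hm5 : ¬ PySem.Int.mod (2 ^ (a' + 1) * 3 ^ 0 * 5 ^ 0 * r) 5 = 0 := by
          rw [d5]; omega
        have hm3 : ¬ PySem.Int.mod (2 ^ (a' + 1) * 3 ^ 0 * 5 ^ 0 * r) 3 = 0 := by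
          rw [d3]; omega
        have hm2 : PySem.Int.mod (2 ^ (a' + 1) * 3 ^ 0 * 5 ^ 0 * r) 2 = 0 := by
          rw [d2]; omega
        have hdiv : PySem.Int.floordiv (2 ^ (a' + 1) * 3 ^ 0 * 5 ^ 0 * r) 2
            = 2 ^ a' * 3 ^ 0 * 5 ^ 0 * r := by
          rw [PySem.Int.floordiv_eq_ediv_of_pos (by norm_num),
              show 2 ^ (a' + 1) * 3 ^ 0 * 5 ^ 0 * r = 2 * (2 ^ a' * 3 ^ 0 * 5 ^ 0 * r) by ring,
              Int.mul_ediv_cancel_left _ (by norm_num)]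
        rw [solveLoop, dif_pos (Or.inl (Or.inl hm2)), dif_neg hn0, dif_neg hm5, dif_neg hm3,
            dif_pos hm2, hdiv]
        by_cases hone : 2 ^ a' * 3 ^ 0 * 5 ^ 0 * r = 1
        · have ha' : a' = 0 := by
            by_contra ha'
            have : (2:Int) ∣ 2 ^ a' * 3 ^ 0 * 5 ^ 0 * r :=
              (two_dvd_iff a' 0 0 r h2).mpr (by omega)
            rw [hone] at this
            norm_num at this
          have hr1 : r = 1 := by
            rw [ha'] at hone; simpa using hone
          rw [if_pos hone, if_pos hr1, ha']
          push_cast; ring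
        · rw [if_neg hone]
          rcases a' with _ | a''
          · -- n' = r, r ≠ 1: loop exits with -1
            have hrr : 2 ^ 0 * 3 ^ 0 * 5 ^ 0 * r = r := by ring
            rw [hrr] at hone ⊢
            have e5 : ¬ PySem.Int.mod r 5 = 0 := by
              rw [PySem.Int.mod_eq_zero_iff_dvd]; exact h5
            have e3 : ¬ PySem.Int.mod r 3 = 0 := by
              rw [PySem.Int.mod_eq_zero_iff_dvd]; exact h3
            have e2 : ¬ PySem.Int.mod r 2 = 0 := by
              rw [PySem.Int.mod_eq_zero_iff_dvd]; exact h2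
            rw [solveLoop, dif_neg (by tauto)]
            have hr1 : r ≠ 1 := hone
            rw [if_neg hr1]
          · rw [ih (a'' + 1) 0 0 r (cnt + 1) (by omega) h2 h3 h5 (by omega)]
            split_ifs with hr1
            · push_cast; ring
            · rfl
      · -- a three present
        have hm5 : ¬ PySem.Int.mod (2 ^ a * 3 ^ (b' + 1) * 5 ^ 0 * r) 5 = 0 := by
          rw [d5]; omega
        have hm3 : PySem.Int.mod (2 ^ a * 3 ^ (b' + 1) * 5 ^ 0 * r) 3 = 0 := by
          rw [d3]; omega
        have hdiv : PySem.Int.floordiv (2 * (2 ^ a * 3 ^ (b' + 1) * 5 ^ 0 * r)) 3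
            = 2 ^ (a + 1) * 3 ^ b' * 5 ^ 0 * r := by
          rw [PySem.Int.floordiv_eq_ediv_of_pos (by norm_num),
              show 2 * (2 ^ a * 3 ^ (b' + 1) * 5 ^ 0 * r)
                = 3 * (2 ^ (a + 1) * 3 ^ b' * 5 ^ 0 * r) by ring,
              Int.mul_ediv_cancel_left _ (by norm_num)]
        have hone : ¬ 2 ^ (a + 1) * 3 ^ b' * 5 ^ 0 * r = 1 := by
          intro h
          have : (2:Int) ∣ 2 ^ (a + 1) * 3 ^ b' * 5 ^ 0 * r :=
            (two_dvd_iff (a + 1) b' 0 r h2).mpr (by omega)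
          rw [h] at this; norm_num at this
        rw [solveLoop, dif_pos (Or.inl (Or.inr (Or.inl hm3))), dif_neg hn0, dif_neg hm5,
            dif_pos hm3, hdiv, if_neg hone,
            ih (a + 1) b' 0 r (cnt + 1) (by omega) h2 h3 h5 (by omega)]
        split_ifs with hr1
        · push_cast; ring
        · rfl
    · -- a five present
      have hm5 : PySem.Int.mod (2 ^ a * 3 ^ b * 5 ^ (c' + 1) * r) 5 = 0 := by
        rw [d5]; omega
      have hdiv : PySem.Int.floordiv (4 * (2 ^ a * 3 ^ b * 5 ^ (c' + 1) * r)) 5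
          = 2 ^ (a + 2) * 3 ^ b * 5 ^ c' * r := by
        rw [PySem.Int.floordiv_eq_ediv_of_pos (by norm_num),
            show 4 * (2 ^ a * 3 ^ b * 5 ^ (c' + 1) * r)
              = 5 * (2 ^ (a + 2) * 3 ^ b * 5 ^ c' * r) by ring,
            Int.mul_ediv_cancel_left _ (by norm_num)]
      have hone : ¬ 2 ^ (a + 2) * 3 ^ b * 5 ^ c' * r = 1 := by
        intro h
        have : (2:Int) ∣ 2 ^ (a + 2) * 3 ^ b * 5 ^ c' * r :=
          (two_dvd_iff (a + 2) b c' r h2).mpr (by omega)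
        rw [h] at this; norm_num at this
      rw [solveLoop, dif_pos (Or.inl (Or.inr (Or.inr hm5))), dif_neg hn0, dif_pos hm5, hdiv,
          if_neg hone, ih (a + 2) b c' r (cnt + 1) (by omega) h2 h3 h5 (by omega)]
      split_ifs with hr1
      · push_cast; ring
      · rfl

theorem solve_eq_alt (n : Int) (hn : n ≠ 0) : solve n = solve_alt n := by
  by_cases h1 : n = 1
  · subst h1
    rw [solve, if_pos rfl,
        show (1:Int) = 2 ^ 0 * 3 ^ 0 * 5 ^ 0 * 1 by norm_num,
        alt_char 0 0 0 1 (by decide) (by decide) (by decide)]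
    norm_num
  · obtain ⟨a, b, c, r, hdec, h2, h3, h5⟩ := decomp_exists n hn
    subst hdec
    have d5 : PySem.Int.mod (2 ^ a * 3 ^ b * 5 ^ c * r) 5 = 0 ↔ 0 < c := by
      rw [PySem.Int.mod_eq_zero_iff_dvd]; exact five_dvd_iff a b c r h5
    have d3 : PySem.Int.mod (2 ^ a * 3 ^ b * 5 ^ c * r) 3 = 0 ↔ 0 < b := by
      rw [PySem.Int.mod_eq_zero_iff_dvd]; exact three_dvd_iff a b c r h3
    have d2 : PySem.Int.mod (2 ^ a * 3 ^ b * 5 ^ c * r) 2 = 0 ↔ 0 < a := by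
      rw [PySem.Int.mod_eq_zero_iff_dvd]; exact two_dvd_iff a b c r h2
    rw [alt_char a b c r h2 h3 h5, solve, if_neg h1]
    by_cases hsum : 1 ≤ a + b + c
    · rw [if_neg (by rw [not_and_or, not_and_or]; push Not; rw [d2, d3, d5]; omega),
          loop_eq (a + 2 * b + 3 * c) a b c r 0 (le_refl _) h2 h3 h5 hsum]
      split_ifs with hr1
      · ring
      · rfl
    · have ha : a = 0 := by omega
      have hb : b = 0 := by omega
      have hc : c = 0 := by omega
      subst ha; subst hb; subst hc
      have hr1 : r ≠ 1 := by
        intro h; apply h1; rw [h]; norm_num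
      rw [if_pos ⟨by simp only [ne_eq, d2]; omega, by simp only [ne_eq, d3]; omega,
            by simp only [ne_eq, d5]; omega⟩, if_neg hr1]

-- ===== VERDICT (by name: the statement is the Claim_ definition above) =====
theorem solve_spec : Claim_equal_solve := by
  intro n _ hpre
  unfold Spec_solve
  exact solve_eq_alt n hpre
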